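-- pv_equiv track=rewrite | github.com/rishat5081/job-scrapper | resume_pipeline.py | _select_ranked_items
-- ===== SOURCE A (Python) =====
-- def _select_ranked_items(items: list[str], keywords: list[str], minimum: int, maximum: int) -> list[str]:
--     if not items:
--         return []
--
--     ranked = []
--     for item in items:
--         lowered = item.lower()
--         score = sum(2 for keyword in keywords if keyword in lowered)
--         ranked.append((score, len(item), item))
--
--     ranked.sort(key=lambda value: (value[0], value[1]), reverse=True)
--     selected = [item for _score, _length, item in ranked[:maximum] if item]
--
--     if len(selected) < minimum:
--         for item in items:
--             if item not in selected:
--                 selected.append(item)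
--             if len(selected) >= minimum:
--                 break
--
--     return selected[:maximum]
-- ===== SOURCE B (Python) =====
-- import heapq
--
--
-- def _select_ranked_items(items: list[str], keywords: list[str], minimum: int, maximum: int) -> list[str]:
--     def rank(item: str) -> tuple[int, int, str]:
--         lowered = item.lower()
--         score = 2 * sum(1 for keyword in keywords if keyword in lowered)
--         return (score, len(item), item)
--
--     top = heapq.nlargest(maximum, (rank(item) for item in items),
--                          key=lambda v: (v[0], v[1]))
--     selected = [item for _score, _length, item in top if item]
--
--     for item in items:
--         if len(selected) >= minimum:
--             break
--         if item not in selected: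
--             selected.append(item)
--
--     return selected[:maximum]
-- ===== Notes on version B (the rewrite author's own statement) =====
-- stated objective: alternative
-- what changed: B pulls the top-`maximum` scored tuples with heapq.nlargest (a bounded heap selection) instead of sorting the whole ranked list and slicing, and pads with a single guard-first loop; Pre_ excludes negative `maximum` (a nonsensical selection count) on which A's tail-keeping negative-slice behaviour is accidental.
-- outside the precondition, e.g. on _select_ranked_items(['a', 'b', 'c'], [], 0, -1): A returns ['a'], B returns []
import Mathlib
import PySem

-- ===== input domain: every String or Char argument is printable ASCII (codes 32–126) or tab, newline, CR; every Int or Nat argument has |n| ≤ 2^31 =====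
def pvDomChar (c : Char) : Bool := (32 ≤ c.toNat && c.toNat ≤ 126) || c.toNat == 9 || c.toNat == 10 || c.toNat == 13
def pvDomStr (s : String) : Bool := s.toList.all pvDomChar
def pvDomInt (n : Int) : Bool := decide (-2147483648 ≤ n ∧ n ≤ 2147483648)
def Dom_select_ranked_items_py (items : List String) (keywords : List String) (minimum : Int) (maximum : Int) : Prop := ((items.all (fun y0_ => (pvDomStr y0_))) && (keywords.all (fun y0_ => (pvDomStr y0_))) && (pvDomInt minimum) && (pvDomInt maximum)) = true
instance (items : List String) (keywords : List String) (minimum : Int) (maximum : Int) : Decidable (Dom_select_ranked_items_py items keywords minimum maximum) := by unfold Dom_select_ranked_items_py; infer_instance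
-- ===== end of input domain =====

-- B selects the top-`maximum` ranked tuples with heapq.nlargest instead of sorting everything and slicing, and pads with a guard-first loop; objective: alternative selection strategy, same results on the natural domain (maximum ≥ 0).


-- ===== PORT A =====
-- A's padding loop: append item if absent, then test `len(selected) >= minimum` and break.
def pvPadA (minimum : Int) : List String → List String → List String
  | [], sel => sel
  | item :: rest, sel =>
    let sel' := if item ∈ sel then sel else sel ++ [item]
    if minimum ≤ (sel'.length : Int) then sel' else pvPadA minimum rest sel'

def select_ranked_items_py (items : List String) (keywords : List String) (minimum : Int) (maximum : Int) : List String :=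
  if items = [] then []
  else
    let ranked : List (Int × Int × String) :=
      items.foldl (fun acc item =>
        let lowered := PySem.Str.lower item
        let score : Int := keywords.foldl (fun s keyword => if PySem.Str.isIn keyword lowered then s + 2 else s) 0
        acc ++ [(score, (PySem.Str.len item : Int), item)]) []
    let ranked := PySem.List.sorted2 ranked (fun v => v.1) (fun v => v.2.1) true
    let selected := ((PySem.List.slice ranked none (some maximum)).filter (fun v => v.2.2 != "")).map (fun v => v.2.2)
    let selected := if (selected.length : Int) < minimum then pvPadA minimum items selected else selected
    PySem.List.slice selected none (some maximum)

-- ===== PORT B =====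
def pvRankB (keywords : List String) (item : String) : Int × Int × String :=
  (2 * ((keywords.filter (fun keyword => PySem.Str.isIn keyword (PySem.Str.lower item))).length : Int),
   (PySem.Str.len item : Int), item)

-- heapq.nlargest(n, xs, key) ported as its documented equivalent sorted(xs, key=key, reverse=True)[:n] (empty for n ≤ 0)
def pvNLargest (n : Int) (xs : List (Int × Int × String)) : List (Int × Int × String) :=
  (PySem.List.sorted2 xs (fun v => v.1) (fun v => v.2.1) true).take n.toNat

-- B's padding loop: test the bound first, then append if absent.
def pvPadB (minimum : Int) : List String → List String → List String
  | [], sel => sel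
  | item :: rest, sel =>
    if minimum ≤ (sel.length : Int) then sel
    else pvPadB minimum rest (if item ∈ sel then sel else sel ++ [item])

def select_ranked_items_py_alt (items : List String) (keywords : List String) (minimum : Int) (maximum : Int) : List String :=
  let top := pvNLargest maximum (items.map (pvRankB keywords))
  let selected := (top.filter (fun v => v.2.2 != "")).map (fun v => v.2.2)
  let selected := pvPadB minimum items selected
  PySem.List.slice selected none (some maximum)

-- ===== PRECONDITION & SPEC =====
-- Pre_ restricts to the natural domain maximum ≥ 0: a negative selection count is nonsensical, and A's value there
-- (keeping all but the last |maximum| entries, an artefact of Python's negative-slice semantics) is accidental.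
def Pre_select_ranked_items_py (items : List String) (keywords : List String) (minimum : Int) (maximum : Int) : Prop := 0 ≤ maximum
instance (items : List String) (keywords : List String) (minimum : Int) (maximum : Int) : Decidable (Pre_select_ranked_items_py items keywords minimum maximum) := by unfold Pre_select_ranked_items_py; infer_instance

def pvWitness_select_ranked_items_py : List String × List String × Int × Int := (["python dev", "cook"], ["python"], 1, 2)

def Spec_select_ranked_items_py (items : List String) (keywords : List String) (minimum : Int) (maximum : Int) (out : List String) : Prop := out = select_ranked_items_py_alt items keywords minimum maximum
instance (items : List String) (keywords : List String) (minimum : Int) (maximum : Int) (out : List String) : Decidable (Spec_select_ranked_items_py items keywords minimum maximum out) := by unfold Spec_select_ranked_items_py; infer_instance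

-- ===== CLAIM (what is proved, stated in full; the proofs are below) =====
def Claim_equal_select_ranked_items_py : Prop := ∀ (items : List String) (keywords : List String) (minimum : Int) (maximum : Int), Dom_select_ranked_items_py items keywords minimum maximum → Pre_select_ranked_items_py items keywords minimum maximum → Spec_select_ranked_items_py items keywords minimum maximum (select_ranked_items_py items keywords minimum maximum)

-- ===== LEMMAS AND PROOFS =====

theorem pv_score_eq (keywords : List String) (lw : List Char) (s : Int) :
    keywords.foldl (fun s keyword => if PySem.Chars.isIn keyword.toList lw then s + 2 else s) s
      = s + 2 * ((keywords.filter (fun keyword => PySem.Chars.isIn keyword.toList lw)).length : Int) := by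
  induction keywords generalizing s with
  | nil => simp
  | cons k ks ih =>
    rw [List.foldl_cons, List.filter_cons, ih]
    by_cases h : PySem.Chars.isIn k.toList lw = true
    · rw [if_pos h, if_pos h]
      simp only [List.length_cons]
      push_cast
      ring
    · rw [if_neg h, if_neg h]

theorem pv_foldl_append_map (items : List String) (keywords : List String) (acc : List (Int × Int × String)) :
    items.foldl (fun acc item =>
      let lowered := PySem.Str.lower item
      let score : Int := keywords.foldl (fun s keyword => if PySem.Str.isIn keyword lowered then s + 2 else s) 0
      acc ++ [(score, (PySem.Str.len item : Int), item)]) acc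
    = acc ++ items.map (pvRankB keywords) := by
  induction items generalizing acc with
  | nil => simp
  | cons x xs ih =>
    simp only [List.foldl_cons, List.map_cons, ih]
    simp [pvRankB, pv_score_eq]

theorem pv_padB_of_le (minimum : Int) (l : List String) (sel : List String)
    (h : minimum ≤ (sel.length : Int)) : pvPadB minimum l sel = sel := by
  cases l with
  | nil => rfl
  | cons x xs => simp [pvPadB, h]

theorem pv_padA_eq_padB (minimum : Int) (l : List String) (sel : List String)
    (h : (sel.length : Int) < minimum) : pvPadA minimum l sel = pvPadB minimum l sel := by
  induction l generalizing sel with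
  | nil => rfl
  | cons x xs ih =>
    by_cases hm : x ∈ sel
    · have hlt : ¬ minimum ≤ (sel.length : Int) := by omega
      simp [pvPadA, pvPadB, hm, hlt, ih sel h]
    · simp only [pvPadA, pvPadB, if_neg hm]
      have hlt : ¬ minimum ≤ (sel.length : Int) := by omega
      rw [if_neg hlt]
      by_cases h2 : minimum ≤ ((sel ++ [x]).length : Int)
      · rw [if_pos h2, pv_padB_of_le _ _ _ h2]
      · rw [if_neg h2, ih _ (by omega)]

theorem pv_pad_eq (minimum : Int) (l : List String) (sel : List String) :
    (if (sel.length : Int) < minimum then pvPadA minimum l sel else sel) = pvPadB minimum l sel := by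
  by_cases h : (sel.length : Int) < minimum
  · rw [if_pos h, pv_padA_eq_padB _ _ _ h]
  · rw [if_neg h, pv_padB_of_le _ _ _ (by omega)]

theorem select_ranked_items_py_eq (items : List String) (keywords : List String) (minimum : Int) (maximum : Int)
    (hmax : 0 ≤ maximum) :
    select_ranked_items_py items keywords minimum maximum = select_ranked_items_py_alt items keywords minimum maximum := by
  unfold select_ranked_items_py select_ranked_items_py_alt pvNLargest
  by_cases hnil : items = []
  · subst hnil
    rw [if_pos rfl]
    simp only [List.map_nil]
    simp only [PySem.List.slice_to (hb := hmax)]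
    simp [pvPadB, PySem.List.sorted2]
  · rw [if_neg hnil]
    simp only [pv_foldl_append_map, List.nil_append, PySem.List.slice_to (hb := hmax)]
    rw [pv_pad_eq]

-- ===== VERDICT (by name: the statement is the Claim_ definition above) =====
theorem select_ranked_items_py_spec : Claim_equal_select_ranked_items_py := by
  intro items keywords minimum maximum _ hpre
  exact select_ranked_items_py_eq items keywords minimum maximum hpre
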